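-- pv_equiv track=rewrite | github.com/8enrich/SO_Processos | q03.py | interleave_groups
-- ===== SOURCE A (Python) =====
-- from collections import deque
--
-- def interleave_groups(groups):
--     dogs = deque([group for group in groups if group[0] == 'dog'])
--     cats = deque([group for group in groups if group[0] == 'cat'])
--     interleaved = []
--
--     last_type = None
--     while dogs or cats:
--         if last_type == 'dog':
--             if cats:
--                 interleaved.append(cats.popleft())
--                 last_type = 'cat'
--             elif dogs:
--                 interleaved.append(dogs.popleft())
--         elif last_type == 'cat':
--             if dogs:
--                 interleaved.append(dogs.popleft())
--                 last_type = 'dog'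
--             elif cats:
--                 interleaved.append(cats.popleft())
--         else:
--             if len(dogs) >= len(cats):
--                 interleaved.append(dogs.popleft())
--                 last_type = 'dog'
--             else:
--                 interleaved.append(cats.popleft())
--                 last_type = 'cat'
--
--     return interleaved
-- ===== SOURCE B (Python) =====
-- def interleave_groups(groups):
--     dogs = [g for g in groups if g[0] == 'dog']
--     cats = [g for g in groups if g[0] == 'cat']
--     first, second = (dogs, cats) if len(dogs) >= len(cats) else (cats, dogs)
--     result = []
--     for i, g in enumerate(first):
--         result.append(g)
--         if i < len(second):
--             result.append(second[i])
--     return result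
-- ===== Notes on version B (the rewrite author's own statement) =====
-- stated objective: simpler
-- what changed: Replaces the stateful while-loop over two deques with a last_type flag by: filter into dogs/cats lists, pick the longer (dogs on tie) as 'first', then one indexed pass emitting first[i] and, while available, second[i] -- the tail of the longer list drains naturally.
-- outside the precondition, e.g. on interleave_groups([[]]): A raises IndexError, B raises IndexError
import Mathlib
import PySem

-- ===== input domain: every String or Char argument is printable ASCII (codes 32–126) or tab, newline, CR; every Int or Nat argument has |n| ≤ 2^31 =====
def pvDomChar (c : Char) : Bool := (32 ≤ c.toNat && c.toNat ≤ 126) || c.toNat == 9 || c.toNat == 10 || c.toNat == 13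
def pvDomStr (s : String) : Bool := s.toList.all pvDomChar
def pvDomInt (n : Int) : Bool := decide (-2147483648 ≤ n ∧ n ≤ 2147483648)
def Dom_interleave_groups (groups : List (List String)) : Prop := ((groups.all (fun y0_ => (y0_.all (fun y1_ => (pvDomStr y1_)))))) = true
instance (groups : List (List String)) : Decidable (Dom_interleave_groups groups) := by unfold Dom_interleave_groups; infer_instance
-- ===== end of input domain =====

-- B replaces A's stateful two-deque while-loop with filters plus one indexed pass
-- over the longer list (dogs on tie), interleaving the shorter; objective: simpler.

-- ===== PORT A =====
-- A's while-loop, step for step: state = (last_type, dogs deque, cats deque, interleaved);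
-- the 'while dogs or cats' condition is the top-level match, the branch order is Python's.
def igLoop (last : Option String) (dogs cats acc : List (List String)) :
    List (List String) :=
  match dogs, cats with
  | [], [] => acc                                              -- while-condition false
  | d :: ds, [] =>
    if last = some "dog" then igLoop last ds [] (acc ++ [d])   -- 'elif dogs' keeps last_type
    else igLoop (some "dog") ds [] (acc ++ [d])
  | [], c :: cs =>
    if last = some "cat" then igLoop last [] cs (acc ++ [c])   -- 'elif cats' keeps last_type
    else igLoop (some "cat") [] cs (acc ++ [c])
  | d :: ds, c :: cs =>
    if last = some "dog" then igLoop (some "cat") (d :: ds) cs (acc ++ [c])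
    else if last = some "cat" then igLoop (some "dog") ds (c :: cs) (acc ++ [d])
    else if (c :: cs).length ≤ (d :: ds).length then igLoop (some "dog") ds (c :: cs) (acc ++ [d])
    else igLoop (some "cat") (d :: ds) cs (acc ++ [c])
termination_by dogs.length + cats.length
decreasing_by all_goals (simp; try omega)

def interleave_groups (groups : List (List String)) : List (List String) :=
  let dogs := groups.filter (fun g => g.head? == some "dog")
  let cats := groups.filter (fun g => g.head? == some "cat")
  igLoop none dogs cats []

-- ===== PORT B =====
def interleave_groups_alt (groups : List (List String)) : List (List String) :=
  let dogs := groups.filter (fun g => g.head? == some "dog")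
  let cats := groups.filter (fun g => g.head? == some "cat")
  let fs := if cats.length ≤ dogs.length then (dogs, cats) else (cats, dogs)
  (PySem.List.enumerate fs.1 0).foldl
    (fun res p =>
      let res := res ++ [p.2]
      if p.1 < (fs.2.length : Int) then res ++ [fs.2.getD p.1.toNat []] else res) []

-- ===== PRECONDITION & SPEC =====
-- Pre_ excludes inputs containing an empty group, on which Python A (group[0]) raises IndexError.
def Pre_interleave_groups (groups : List (List String)) : Prop :=
  ∀ g ∈ groups, g ≠ []
instance (groups : List (List String)) : Decidable (Pre_interleave_groups groups) := by
  unfold Pre_interleave_groups; infer_instance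
def pvWitness_interleave_groups : List (List String) :=
  [["dog", "rex"], ["cat", "tom"], ["dog", "fido"], ["bird"]]
def Spec_interleave_groups (groups : List (List String)) (out : List (List String)) : Prop :=
  out = interleave_groups_alt groups
instance (groups : List (List String)) (out : List (List String)) :
    Decidable (Spec_interleave_groups groups out) := by
  unfold Spec_interleave_groups; infer_instance

-- ===== CLAIM (what is proved, stated in full; the proofs are below) =====
def Claim_equal_interleave_groups : Prop :=
  ∀ (groups : List (List String)), Dom_interleave_groups groups →
    Pre_interleave_groups groups →
    Spec_interleave_groups groups (interleave_groups groups)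

-- ===== LEMMAS AND PROOFS =====

-- the common shape both programs compute: alternate, starting from the first argument
def weave {α : Type} : List α → List α → List α
  | [], ys => ys
  | x :: xs, ys => x :: weave ys xs
termination_by xs ys => xs.length + ys.length
decreasing_by simp; omega

theorem weave_nil_right {α : Type} (xs : List α) : weave xs [] = xs := by
  cases xs with
  | nil => simp [weave]
  | cons x xs => simp [weave]

-- A's loop in state last = "dog" (resp. "cat") produces acc ++ weave cats dogs (resp. dogs cats)
theorem igLoop_state (n : Nat) :
    ∀ dogs cats acc, dogs.length + cats.length = n →
      (igLoop (some "dog") dogs cats acc = acc ++ weave cats dogs ∧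
       igLoop (some "cat") dogs cats acc = acc ++ weave dogs cats) := by
  induction n using Nat.strong_induction_on with
  | _ n ih =>
    intro dogs cats acc hn
    constructor
    · cases cats with
      | nil =>
        cases dogs with
        | nil => simp [igLoop, weave]
        | cons d ds =>
          rw [igLoop]
          have := (ih (ds.length + 0) (by simp at hn; omega) ds [] (acc ++ [d]) (by simp)).1
          simp only [reduceIte, this, weave]
          simp
      | cons c cs =>
        cases dogs with
        | nil =>
          rw [igLoop]
          have := (ih (0 + cs.length) (by simp at hn; omega) [] cs (acc ++ [c]) (by simp)).2
          simp only [this, weave]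
          simp
        | cons d ds =>
          rw [igLoop]
          have := (ih ((d :: ds).length + cs.length) (by simp at hn ⊢; omega)
                    (d :: ds) cs (acc ++ [c]) rfl).2
          simp only [reduceIte, this, weave]
          simp
    · cases dogs with
      | nil =>
        cases cats with
        | nil => simp [igLoop, weave]
        | cons c cs =>
          rw [igLoop]
          have := (ih (0 + cs.length) (by simp at hn; omega) [] cs (acc ++ [c]) (by simp)).2
          simp only [reduceIte, this, weave]
          simp
      | cons d ds =>
        cases cats with
        | nil =>
          rw [igLoop]
          have := (ih (ds.length + 0) (by simp at hn; omega) ds [] (acc ++ [d]) (by simp)).1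
          simp only [this, weave, weave_nil_right]
          simp
        | cons c cs =>
          rw [igLoop]
          have := (ih (ds.length + (c :: cs).length) (by simp at hn ⊢; omega)
                    ds (c :: cs) (acc ++ [d]) rfl).1
          simp only [reduceIte, this, weave]
          simp

theorem igLoop_none (dogs cats : List (List String)) :
    igLoop none dogs cats [] =
      if cats.length ≤ dogs.length then weave dogs cats else weave cats dogs := by
  match dogs, cats with
  | [], [] => simp [igLoop, weave]
  | d :: ds, [] =>
    rw [igLoop]
    have := (igLoop_state (ds.length + 0) ds [] [d] (by simp)).1
    simp [this, weave, weave_nil_right]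
  | [], c :: cs =>
    rw [igLoop]
    have := (igLoop_state (0 + cs.length) [] cs [c] (by simp)).2
    simp [this, weave]
  | d :: ds, c :: cs =>
    rw [igLoop]
    by_cases h : (c :: cs).length ≤ (d :: ds).length
    · have h' : cs.length ≤ ds.length := by simpa using h
      have := (igLoop_state (ds.length + (c :: cs).length) ds (c :: cs) [d] rfl).1
      simp [h', this, weave]
    · have h' : ¬ cs.length ≤ ds.length := by simpa using h
      have := (igLoop_state ((d :: ds).length + cs.length) (d :: ds) cs [c] rfl).2
      simp [h', this, weave]

-- B's indexed pass, generalized over the starting index of enumerate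
theorem bFold (second : List (List String)) (n : Nat) :
    ∀ (first : List (List String)) (k : Nat) (acc : List (List String)),
      first.length = n → second.length ≤ k + first.length →
      (PySem.List.enumerate first (k : Int)).foldl
        (fun res p =>
          let res := res ++ [p.2]
          if p.1 < (second.length : Int) then res ++ [second.getD p.1.toNat []] else res) acc
      = acc ++ weave first (second.drop k) := by
  induction n with
  | zero =>
    intro first k acc h1 h2
    have hf : first = [] := by cases first <;> simp_all
    subst hf
    have hd : second.drop k = [] := List.drop_eq_nil_of_le (by simp at h2; omega)
    simp [PySem.List.enumerate_nil, hd, weave]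
  | succ m ih =>
    intro first k acc h1 h2
    cases first with
    | nil => simp at h1
    | cons f fs =>
      have hfs : fs.length = m := by simpa using h1
      have hcast : ((k : Int) + 1) = ((k + 1 : Nat) : Int) := by push_cast; ring
      rw [PySem.List.enumerate_cons]
      simp only [List.foldl_cons]
      by_cases hk : k < second.length
      · have hgd : second.getD k [] = second[k] := by
          simp [List.getD_eq_getElem?_getD, List.getElem?_eq_getElem hk]
        have hget : second.drop k = second.getD k [] :: second.drop (k + 1) := by
          rw [hgd]; exact List.drop_eq_getElem_cons hk
        rw [hcast, ih fs (k + 1) _ hfs (by simp at h2; omega), hget]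
        have hki : ((k : Int) < (second.length : Int)) := by exact_mod_cast hk
        simp [hki, weave]
      · have hdrop : second.drop k = [] := List.drop_eq_nil_of_le (by omega)
        have hdrop1 : second.drop (k + 1) = [] := List.drop_eq_nil_of_le (by omega)
        rw [hcast, ih fs (k + 1) _ hfs (by simp at h2 ⊢; omega)]
        have hki : ¬ ((k : Int) < (second.length : Int)) := by exact_mod_cast hk
        simp [hki, hdrop, hdrop1, weave_nil_right]

-- ===== VERDICT (by name: the statement is the Claim_ definition above) =====
theorem interleave_groups_spec : Claim_equal_interleave_groups := by
  intro groups _ _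
  unfold Spec_interleave_groups interleave_groups interleave_groups_alt
  set dogs := groups.filter (fun g => g.head? == some "dog") with hd
  set cats := groups.filter (fun g => g.head? == some "cat") with hc
  rw [igLoop_none]
  by_cases h : cats.length ≤ dogs.length
  · have := bFold cats dogs.length dogs 0 [] rfl (by omega)
    simp only [Nat.cast_zero, List.drop_zero, List.nil_append] at this
    simp only [h, if_pos]
    exact this.symm
  · have := bFold dogs cats.length cats 0 [] rfl (by omega)
    simp only [Nat.cast_zero, List.drop_zero, List.nil_append] at this
    simp only [h, if_false]
    exact this.symm
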